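-- pv_equiv track=rewrite | github.com/cantsaydorifto/leet-py | 423/b.py | checkIncreasingSubarray
-- ===== SOURCE A (Python) =====
-- def checkIncreasingSubarray(nums: list[int], k: int) -> bool:
--     res = []
--     j = 0
--     while j + k <= len(nums):
--         is_increasing = True
--         for i in range(j, j + k - 1):
--             if nums[i] >= nums[i + 1]:
--                 is_increasing = False
--                 break
--         if is_increasing:
--             res.append(j)
--         j += 1
--     return res
-- ===== SOURCE B (Python) =====
-- def checkIncreasingSubarray(nums: list[int], k: int) -> bool:
--     n = len(nums)
--     if k <= 1:
--         # any window of length <= 1 is trivially strictly increasing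
--         return list(range(n - k + 1))
--     run = [1] * n
--     for i in range(n - 2, -1, -1):
--         if nums[i] < nums[i + 1]:
--             run[i] = run[i + 1] + 1
--     return [j for j in range(n - k + 1) if run[j] >= k]
-- ===== Notes on version B (the rewrite author's own statement) =====
-- stated objective: faster
-- what changed: Replaces the per-start inner scan of each length-k window by a single backward pass that precomputes the increasing-run length starting at every index, then emits j whenever run[j] >= k.
import Mathlib
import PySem

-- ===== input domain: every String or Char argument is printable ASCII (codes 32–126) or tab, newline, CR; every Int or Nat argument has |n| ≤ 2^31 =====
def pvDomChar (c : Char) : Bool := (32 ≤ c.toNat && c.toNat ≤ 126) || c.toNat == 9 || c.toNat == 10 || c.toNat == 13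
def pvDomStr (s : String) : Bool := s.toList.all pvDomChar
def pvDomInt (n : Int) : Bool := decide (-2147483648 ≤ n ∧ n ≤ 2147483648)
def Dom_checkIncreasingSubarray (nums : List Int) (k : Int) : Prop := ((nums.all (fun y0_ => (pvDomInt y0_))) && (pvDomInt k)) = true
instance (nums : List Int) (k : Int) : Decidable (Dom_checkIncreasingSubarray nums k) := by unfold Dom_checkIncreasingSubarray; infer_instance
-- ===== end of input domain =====

-- B replaces A's per-start O(k) window scan by one backward pass computing increasing-run
-- lengths, then emits j iff run[j] ≥ k (objective: faster, asymptotic O(n) vs O(n·k)).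


-- ===== PORT A =====
-- inner 'for i in range(j, j+k-1)' with its break: recursion over the index list.
-- nums[i] is in range whenever this is reached from the outer loop, so pyGetD's default is never used.
def pvInnerA (nums : List Int) : List Int → Bool
  | [] => true
  | i :: rest =>
    if PySem.List.pyGetD nums i 0 ≥ PySem.List.pyGetD nums (i + 1) 0 then false
    else pvInnerA nums rest

-- the 'while j + k <= len(nums)' loop; fuel = exact number of remaining iterations
def pvLoopA (nums : List Int) (k : Int) (j : Int) : Nat → List Int
  | 0 => []
  | fuel + 1 =>
    (if pvInnerA nums (PySem.List.pyRange j (j + k - 1) 1) then [j] else []) ++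
      pvLoopA nums k (j + 1) fuel

def checkIncreasingSubarray (nums : List Int) (k : Int) : List Int :=
  pvLoopA nums k 0 ((nums.length : Int) - k + 1).toNat

-- ===== PORT B =====
-- the backward pass 'for i in range(n-2, -1, -1)' building run[], as structural recursion
def pvRuns : List Int → List Int
  | [] => []
  | [_] => [1]
  | a :: b :: rest =>
    match pvRuns (b :: rest) with
    | r :: rs => (if a < b then r + 1 else 1) :: r :: rs
    | [] => []  -- unreachable: pvRuns of a nonempty list is nonempty

def checkIncreasingSubarray_alt (nums : List Int) (k : Int) : List Int :=
  let n : Int := nums.length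
  if k ≤ 1 then PySem.List.pyRange 0 (n - k + 1) 1
  else
    let run := pvRuns nums
    (PySem.List.pyRange 0 (n - k + 1) 1).filter (fun j => PySem.List.pyGetD run j 0 ≥ k)

-- ===== PRECONDITION & SPEC =====
def Spec_checkIncreasingSubarray (nums : List Int) (k : Int) (out : List Int) : Prop := out = checkIncreasingSubarray_alt nums k
instance (nums : List Int) (k : Int) (out : List Int) : Decidable (Spec_checkIncreasingSubarray nums k out) := by unfold Spec_checkIncreasingSubarray; infer_instance

-- ===== CLAIM (what is proved, stated in full; the proofs are below) =====
def Claim_equal_checkIncreasingSubarray : Prop := ∀ (nums : List Int) (k : Int), Dom_checkIncreasingSubarray nums k → Spec_checkIncreasingSubarray nums k (checkIncreasingSubarray nums k)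

-- ===== LEMMAS AND PROOFS =====

-- consecutive integers starting at j, proof-side normal form for both ranges
def pvSeq (j : Int) : Nat → List Int
  | 0 => []
  | m + 1 => j :: pvSeq (j + 1) m

theorem pvSeq_eq_pyRange (a b : Int) : PySem.List.pyRange a b 1 = pvSeq a (b - a).toNat := by
  generalize h : (b - a).toNat = m
  induction m generalizing a with
  | zero => rw [PySem.List.pyRange_one_eq_nil (by omega)]; rfl
  | succ m ih =>
    have hc : PySem.List.pyRange a b 1 = a :: PySem.List.pyRange (a + 1) b 1 :=
      PySem.List.pyRange_one_cons (by omega)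
    rw [hc, ih (a + 1) (by omega)]
    rfl

theorem mem_pvSeq {x j : Int} {m : Nat} : x ∈ pvSeq j m ↔ j ≤ x ∧ x < j + m := by
  induction m generalizing j with
  | zero => simp [pvSeq]
  | succ m ih => simp [pvSeq, ih]; omega

theorem pvLoopA_eq_filter (nums : List Int) (k : Int) (j : Int) (fuel : Nat) :
    pvLoopA nums k j fuel =
      (pvSeq j fuel).filter (fun j' => pvInnerA nums (PySem.List.pyRange j' (j' + k - 1) 1)) := by
  induction fuel generalizing j with
  | zero => rfl
  | succ fuel ih =>
    simp only [pvLoopA, pvSeq, List.filter_cons, ih]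
    split <;> simp

theorem pvRuns_length (l : List Int) : (pvRuns l).length = l.length := by
  induction l using pvRuns.induct with
  | case1 => rfl
  | case2 => rfl
  | case3 a b rest r rs h ih => simp only [pvRuns, h]; simp [← ih, h]
  | case4 a b rest h ih => rw [h] at ih; simp at ih

theorem pvRuns_ne_nil (b : Int) (rest : List Int) : pvRuns (b :: rest) ≠ [] := by
  intro h
  have := pvRuns_length (b :: rest)
  rw [h] at this
  simp at this

theorem pvRuns_cons (a b : Int) (rest : List Int) :
    pvRuns (a :: b :: rest) =
      (if a < b then (pvRuns (b :: rest)).getD 0 0 + 1 else 1) :: pvRuns (b :: rest) := by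
  simp only [pvRuns]
  cases h : pvRuns (b :: rest) with
  | nil => exact absurd h (pvRuns_ne_nil b rest)
  | cons r rs => simp

-- value of run at a valid index
def pvRunAt (nums : List Int) (j : Nat) : Int := (pvRuns nums).getD j 0

theorem pvRunAt_succ (a : Int) (l : List Int) (hl : l ≠ []) (j : Nat) :
    pvRunAt (a :: l) (j + 1) = pvRunAt l j := by
  cases l with
  | nil => exact absurd rfl hl
  | cons b cs => rw [pvRunAt, pvRuns_cons, List.getD_cons_succ]; rfl

theorem pvRunAt_pos (nums : List Int) (j : Nat) (h : j < nums.length) : 1 ≤ pvRunAt nums j := by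
  have hmem : ∀ r ∈ pvRuns nums, 1 ≤ r := by
    clear h
    induction nums using pvRuns.induct with
    | case1 => simp [pvRuns]
    | case2 => simp [pvRuns]
    | case3 a b rest r rs hh ih =>
      intro x hx
      rw [pvRuns_cons] at hx
      rcases List.mem_cons.mp hx with h1 | h2
      · subst h1
        split
        · have : 1 ≤ (pvRuns (b :: rest)).getD 0 0 := by
            apply ih
            cases hg : pvRuns (b :: rest) with
            | nil => exact absurd hg (pvRuns_ne_nil b rest)
            | cons y ys => rw [List.getD_cons_zero]; exact List.mem_cons_self
          omega
        · omega
      · exact ih x h2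
    | case4 a b rest hh ih => exact absurd hh (pvRuns_ne_nil b rest)
  apply hmem
  have hlen : j < (pvRuns nums).length := by rw [pvRuns_length]; exact h
  rw [pvRunAt, List.getD_eq_getElem _ _ hlen]
  exact List.getElem_mem hlen

theorem pvRunAt_rec (nums : List Int) (j : Nat) (h : j < nums.length) :
    pvRunAt nums j =
      if j + 1 < nums.length ∧ nums.getD j 0 < nums.getD (j + 1) 0
      then pvRunAt nums (j + 1) + 1 else 1 := by
  induction nums generalizing j with
  | nil => simp at h
  | cons a l ih =>
    cases j with
    | zero =>
      cases l with
      | nil => simp [pvRunAt, pvRuns]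
      | cons b cs =>
        rw [pvRunAt, pvRuns_cons]
        simp only [List.getD_cons_zero, List.getD_cons_succ, List.length_cons]
        by_cases hab : a < b
        · rw [if_pos hab, if_pos ⟨by omega, hab⟩,
            pvRunAt_succ a (b :: cs) (by simp) 0]
          rfl
        · rw [if_neg hab, if_neg (by intro hc; exact hab hc.2)]
    | succ m =>
      have hml : m < l.length := by simpa using h
      have hl : l ≠ [] := by cases l <;> simp_all
      rw [pvRunAt_succ a l hl m, ih m hml]
      simp only [List.getD_cons_succ, List.length_cons]
      by_cases hc : m + 1 < l.length ∧ l.getD m 0 < l.getD (m + 1) 0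
      · rw [if_pos hc, if_pos ⟨by omega, hc.2⟩, pvRunAt_succ a l hl (m + 1)]
      · rw [if_neg hc, if_neg (by intro hcc; exact hc ⟨by omega, hcc.2⟩)]

-- main bridge: the inner scan over pairs (j,j+1),…,(j+m-1,j+m) succeeds iff run[j] ≥ m+1
theorem pvInner_iff_run (nums : List Int) (m j : Nat) (h : j + m < nums.length) :
    (pvInnerA nums (pvSeq (j : Int) m) = true) ↔ ((m : Int) + 1 ≤ pvRunAt nums j) := by
  induction m generalizing j with
  | zero =>
    refine ⟨fun _ => ?_, fun _ => rfl⟩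
    have := pvRunAt_pos nums j (by omega)
    push_cast
    omega
  | succ m ih =>
    have hcast : (j : Int) + 1 = ((j + 1 : Nat) : Int) := by push_cast; ring
    have hg0 : PySem.List.pyGetD nums (j : Int) 0 = nums.getD j 0 :=
      PySem.List.pyGetD_natCast nums j 0
    have hg1 : PySem.List.pyGetD nums ((j : Int) + 1) 0 = nums.getD (j + 1) 0 := by
      rw [hcast]; exact PySem.List.pyGetD_natCast nums (j + 1) 0
    simp only [pvSeq, pvInnerA, hg0, hg1]
    by_cases hlt : nums.getD j 0 < nums.getD (j + 1) 0
    · rw [if_neg (not_le.mpr hlt), hcast, ih (j + 1) (by omega),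
        pvRunAt_rec nums j (by omega), if_pos ⟨by omega, hlt⟩]
      push_cast
      omega
    · rw [if_pos (not_lt.mp hlt), pvRunAt_rec nums j (by omega),
        if_neg (by intro hc; exact hlt hc.2)]
      constructor
      · intro hc; simp at hc
      · intro hc; exfalso; push_cast at hc; omega

-- ===== VERDICT (by name: the statement is the Claim_ definition above) =====
theorem checkIncreasingSubarray_spec : Claim_equal_checkIncreasingSubarray := by
  intro nums k _
  unfold Spec_checkIncreasingSubarray checkIncreasingSubarray checkIncreasingSubarray_alt
  rw [pvLoopA_eq_filter]
  have he : ((nums.length : Int) - k + 1 - 0) = ((nums.length : Int) - k + 1) := by ring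
  by_cases hk : k ≤ 1
  · rw [if_pos hk, pvSeq_eq_pyRange, he]
    apply List.filter_eq_self.mpr
    intro j hj
    rw [PySem.List.pyRange_one_eq_nil (show (j : Int) + k - 1 ≤ j by omega)]
    rfl
  · rw [if_neg hk, pvSeq_eq_pyRange, he]
    apply List.filter_congr
    intro j hj
    have hjmem := (mem_pvSeq).mp hj
    obtain ⟨jn, rfl⟩ : ∃ jn : Nat, (jn : Int) = j := ⟨j.toNat, by omega⟩
    obtain ⟨m, hmk⟩ : ∃ m : Nat, (m : Int) = k - 1 := ⟨(k - 1).toNat, by omega⟩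
    have hjn : (jn : Int) + k ≤ (nums.length : Int) := by omega
    rw [pvSeq_eq_pyRange]
    have hseq : ((jn : Int) + k - 1 - jn).toNat = m := by omega
    rw [hseq]
    have hbound : jn + m < nums.length := by omega
    have hrun : PySem.List.pyGetD (pvRuns nums) (jn : Int) 0 = pvRunAt nums jn :=
      PySem.List.pyGetD_natCast (pvRuns nums) jn 0
    have hiff := pvInner_iff_run nums m jn hbound
    have hk' : (m : Int) + 1 = k := by omega
    rw [hk'] at hiff
    simp only [hrun, ge_iff_le]
    by_cases hc : pvInnerA nums (pvSeq (jn : Int) m) = true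
    · simp [hc, hiff.mp hc]
    · have h2 : ¬ (k ≤ pvRunAt nums jn) := fun hx => hc (hiff.mpr hx)
      simp only [Bool.not_eq_true] at hc
      simp [hc, h2]
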